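-- pv_equiv track=rewrite | github.com/jonkahana/CLIPPR | dataset.py | arr2arr
-- ===== SOURCE A (Python) =====
-- def arr2arr(arr1, arr2):
--     a2a = {}
--     for v1, v2 in zip(arr1, arr2):
--         if v1 in a2a.keys():
--             if a2a[v1] != v2:
--                 raise ValueError(f'Prompt targets and Regression targets are not synced')
--         else:
--             a2a[v1] = v2
--     return a2a
-- ===== SOURCE B (Python) =====
-- def arr2arr(arr1, arr2):
--     groups = {}
--     for v1, v2 in zip(arr1, arr2):
--         groups.setdefault(v1, []).append(v2)
--     out = {}
--     for k, vs in groups.items():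
--         for v in vs:
--             if v != vs[0]:
--                 raise ValueError(f'Prompt targets and Regression targets are not synced')
--         out[k] = vs[0]
--     return out
-- ===== Notes on version B (the rewrite author's own statement) =====
-- stated objective: alternative
-- what changed: B replaces A's single pass with on-the-fly consistency checks by a two-pass scheme: first group all values per key with setdefault/append, then verify each group is constant and build the mapping from each group's first element.
-- outside the precondition, e.g. on arr2arr([1, 1], [2, 3]): A raises ValueError, B raises ValueError
import Mathlib
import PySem

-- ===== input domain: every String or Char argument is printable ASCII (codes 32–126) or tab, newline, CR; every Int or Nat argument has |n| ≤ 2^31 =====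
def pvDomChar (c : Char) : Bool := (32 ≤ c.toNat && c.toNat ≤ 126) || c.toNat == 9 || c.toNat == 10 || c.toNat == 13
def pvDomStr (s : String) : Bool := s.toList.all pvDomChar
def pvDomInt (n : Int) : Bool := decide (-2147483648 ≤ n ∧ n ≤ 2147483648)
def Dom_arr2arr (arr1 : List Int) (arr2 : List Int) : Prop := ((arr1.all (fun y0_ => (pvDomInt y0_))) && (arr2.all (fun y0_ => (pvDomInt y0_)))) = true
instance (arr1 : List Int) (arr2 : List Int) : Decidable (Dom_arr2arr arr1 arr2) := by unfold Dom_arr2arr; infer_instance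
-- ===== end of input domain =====

-- ===== PORT A =====
-- B groups all values per key first and checks consistency in a second pass, instead of
-- checking on the fly; same cost, different decomposition ("alternative").
-- Python A raises ValueError when a key reappears with a different value; those inputs are
-- excluded by Pre_arr2arr, so on that branch the port keeps the dict unchanged (as Python
-- does on the matching-value branch).
def arr2arr (arr1 : List Int) (arr2 : List Int) : List (Int × Int) :=
  ((arr1.zip arr2).foldl
    (fun a2a p => if a2a.contains p.1 then a2a else a2a.insert p.1 p.2)
    PySem.Dict.empty).items

-- ===== PORT B =====
-- first pass of Source B: groups.setdefault(v1, []).append(v2)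
def arr2arrGroups (arr1 : List Int) (arr2 : List Int) : PySem.Dict Int (List Int) :=
  (arr1.zip arr2).foldl (fun g p => g.modify p.1 [] (· ++ [p.2])) PySem.Dict.empty

-- second pass of Source B: the consistency check raises exactly on inputs excluded by
-- Pre_arr2arr; every group list is nonempty by construction, so vs[0] is vs.headD 0.
def arr2arr_alt (arr1 : List Int) (arr2 : List Int) : List (Int × Int) :=
  ((arr2arrGroups arr1 arr2).items.foldl
    (fun out kv => out.insert kv.1 (kv.2.headD 0))
    PySem.Dict.empty).items

-- ===== PRECONDITION & SPEC =====
-- Pre_ excludes exactly the inputs where some key occurs with two different values in the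
-- zipped pairs: there Python A (and Python B) raise ValueError.
def Pre_arr2arr (arr1 : List Int) (arr2 : List Int) : Prop :=
  ∀ p ∈ arr1.zip arr2, ∀ q ∈ arr1.zip arr2, p.1 = q.1 → p.2 = q.2
instance (arr1 : List Int) (arr2 : List Int) : Decidable (Pre_arr2arr arr1 arr2) := by
  unfold Pre_arr2arr; infer_instance
def pvWitness_arr2arr : List Int × List Int := ([1, 2, 1], [5, 6, 5])

def Spec_arr2arr (arr1 : List Int) (arr2 : List Int) (out : List (Int × Int)) : Prop := out = arr2arr_alt arr1 arr2
instance (arr1 : List Int) (arr2 : List Int) (out : List (Int × Int)) : Decidable (Spec_arr2arr arr1 arr2 out) := by unfold Spec_arr2arr; infer_instance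

-- ===== CLAIM (what is proved, stated in full; the proofs are below) =====
def Claim_equal_arr2arr : Prop := ∀ (arr1 : List Int) (arr2 : List Int), Dom_arr2arr arr1 arr2 → Pre_arr2arr arr1 arr2 → Spec_arr2arr arr1 arr2 (arr2arr arr1 arr2)

-- ===== LEMMAS AND PROOFS =====

-- Invariant linking A's one-pass dict to B's group dict: A's items are B's items with each
-- group replaced by its first element.
lemma arr2arr_inv (l : List (Int × Int)) (d : PySem.Dict Int Int)
    (g : PySem.Dict Int (List Int)) (hk : g.keys.Nodup)
    (hne : ∀ kv ∈ g.items, kv.2 ≠ [])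
    (h : d.items = g.items.map (fun kv => (kv.1, kv.2.headD 0))) :
    (l.foldl (fun a2a p => if a2a.contains p.1 then a2a else a2a.insert p.1 p.2) d).items
      = ((l.foldl (fun g p => g.modify p.1 [] (· ++ [p.2])) g).items).map
          (fun kv => (kv.1, kv.2.headD 0)) := by
  induction l generalizing d g with
  | nil => simpa using h
  | cons p l ih =>
    obtain ⟨k, v⟩ := p
    have hkeys : d.keys = g.keys := by
      simp only [PySem.Dict.keys, h, List.map_map]; rfl
    have hcont : d.contains k = g.contains k := by
      rw [PySem.Dict.contains_eq_decide_mem_keys, PySem.Dict.contains_eq_decide_mem_keys, hkeys]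
    simp only [List.foldl_cons, PySem.Dict.modify]
    by_cases hc : g.contains k = true
    · rw [hcont, hc, if_pos rfl]
      apply ih
      · exact PySem.Dict.nodup_keys_insert _ _ _ hk
      · intro kv hkv
        rcases (PySem.Dict.mem_items_insert _ _ _ _).1 hkv with heq | ⟨hmem, _⟩
        · subst heq; simp
        · exact hne _ hmem
      · rw [h, PySem.Dict.items_insert_of_contains _ _ hc, List.map_map]
        apply List.map_congr_left
        intro kv hkv
        have hv2 : kv.2 ≠ [] := hne _ hkv
        obtain ⟨k1, vs⟩ := kv
        by_cases hkk : k1 = k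
        · subst hkk
          have hget : g.getD k1 [] = vs := PySem.Dict.getD_of_mem_items g hkv hk []
          simp only [Function.comp_apply, beq_self_eq_true, if_true, hget]
          cases vs with
          | nil => exact absurd rfl hv2
          | cons a t => simp
        · simp [Function.comp, hkk]
    · have hcf : g.contains k = false := by simpa using hc
      have hcf' : d.contains k = false := hcont.trans hcf
      rw [hcont, hcf, if_neg (by simp)]
      apply ih
      · rw [PySem.Dict.keys_insert_of_not_contains _ _ hcf]
        have hkn : k ∉ g.keys := by
          intro hx
          have hcx : g.contains k = true := by
            rw [PySem.Dict.contains_eq_decide_mem_keys]; simpa using hx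
          simp [hcf] at hcx
        have hdis : g.keys.Disjoint [k] := by
          intro y hy hmem
          have hyk : y = k := by simpa using hmem
          subst hyk
          exact hkn hy
        exact List.Nodup.append hk (List.nodup_singleton _) hdis
      · intro kv hkv
        rcases (PySem.Dict.mem_items_insert _ _ _ _).1 hkv with heq | ⟨hmem, _⟩
        · subst heq; simp
        · exact hne _ hmem
      · rw [PySem.Dict.items_insert_of_not_contains _ _ hcf',
            PySem.Dict.items_insert_of_not_contains _ _ hcf,
            PySem.Dict.getD_of_not_contains _ _ hcf, h, List.map_append]
        simp

lemma groups_keys_nodup (arr1 arr2 : List Int) : (arr2arrGroups arr1 arr2).keys.Nodup := by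
  unfold arr2arrGroups
  exact PySem.Dict.nodup_keys_foldl_modify_key (arr1.zip arr2) (fun p => p.1) []
    (fun _ p vs => vs ++ [p.2]) PySem.Dict.empty PySem.Dict.nodup_keys_empty

lemma alt_eq_map (arr1 arr2 : List Int) :
    arr2arr_alt arr1 arr2
      = (arr2arrGroups arr1 arr2).items.map (fun kv => (kv.1, kv.2.headD 0)) := by
  unfold arr2arr_alt
  have h := PySem.Dict.items_foldl_insert_fresh (arr2arrGroups arr1 arr2).items
    (fun kv => kv.1) (fun kv => kv.2.headD 0) PySem.Dict.empty
    (by intro a _; simp [PySem.Dict.contains_empty])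
    (by simpa [PySem.Dict.keys] using groups_keys_nodup arr1 arr2)
  simpa [PySem.Dict.empty] using h

-- ===== VERDICT (by name: the statement is the Claim_ definition above) =====
theorem arr2arr_spec : Claim_equal_arr2arr := by
  intro arr1 arr2 _ _
  unfold Spec_arr2arr arr2arr
  rw [alt_eq_map]
  unfold arr2arrGroups
  exact arr2arr_inv _ _ _ PySem.Dict.nodup_keys_empty (by simp [PySem.Dict.empty]) (by simp [PySem.Dict.empty])
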